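-- pv_equiv track=rewrite | github.com/harim0/Algorithm_STUDY_2024 | Programmers/Python/bfQ5_stress.py | choose_dungeons
-- ===== SOURCE A (Python) =====
-- def choose_dungeons(k, dungeons, used, cnt):
--     max_cnt = cnt
--     for idx in range(len(dungeons)):
--         if not used[idx] and k>=dungeons[idx][0]:
--             used[idx] = True
--             max_cnt = max(max_cnt, choose_dungeons(k-dungeons[idx][1], dungeons, used, cnt+1))
--             used[idx] = False
--     return max_cnt
-- ===== SOURCE B (Python) =====
-- def choose_dungeons(k, dungeons, used, cnt):
--     # Bitmask subset DP: a set of dungeons is clearable in some order iff some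
--     # ordering works; the fatigue left after clearing a set is k minus the sum
--     # of its costs, independent of order, so dp over subsets suffices.
--     items = [(dungeons[i][0], dungeons[i][1]) for i in range(len(dungeons)) if not used[i]]
--     n = len(items)
--     spent = [None] * (1 << n)   # spent[mask] = fatigue left after clearing mask, or None if infeasible
--     spent[0] = k
--     best = 0
--     for mask in range(1, 1 << n):
--         for i in range(n):
--             if mask >> i & 1:
--                 prev = spent[mask ^ (1 << i)]
--                 if prev is not None and prev >= items[i][0]:
--                     spent[mask] = prev - items[i][1]
--                     break
--         if spent[mask] is not None:
--             best = max(best, bin(mask).count("1"))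
--     return cnt + best
-- ===== Notes on version B (the rewrite author's own statement) =====
-- stated objective: alternative
-- what changed: Replaces the factorial backtracking over orderings (mutable used-flags, recursion per ordering) with a bottom-up bitmask subset DP: the fatigue left after clearing a set of dungeons is k minus the sum of its costs regardless of order, so feasibility is computed once per subset (any last element) and the answer is the largest feasible subset; costs differ (n! vs 2^n) and neither dominates on all inputs, so no speed claim is made.
-- outside the precondition, e.g. on choose_dungeons(0, [[1]], [False], 0): A returns 0, B raises IndexError
import Mathlib
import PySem

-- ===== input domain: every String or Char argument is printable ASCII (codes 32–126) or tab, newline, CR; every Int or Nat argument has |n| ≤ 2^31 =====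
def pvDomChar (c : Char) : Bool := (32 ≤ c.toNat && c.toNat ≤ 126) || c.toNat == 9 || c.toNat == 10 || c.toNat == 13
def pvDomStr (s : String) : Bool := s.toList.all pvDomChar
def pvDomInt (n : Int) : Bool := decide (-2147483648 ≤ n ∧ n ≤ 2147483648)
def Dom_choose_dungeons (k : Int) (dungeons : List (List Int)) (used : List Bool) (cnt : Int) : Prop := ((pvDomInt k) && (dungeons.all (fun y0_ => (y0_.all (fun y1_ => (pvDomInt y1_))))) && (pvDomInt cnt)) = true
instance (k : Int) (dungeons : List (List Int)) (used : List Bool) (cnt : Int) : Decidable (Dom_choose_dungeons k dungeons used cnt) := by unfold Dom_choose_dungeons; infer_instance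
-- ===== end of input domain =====

-- B replaces A's factorial backtracking over orderings by a bitmask subset DP
-- (remaining fatigue after a set of dungeons is order-independent); A
-- temporarily mutates `used` but restores it before returning, so the net
-- effect on the caller is the return value only.

-- ===== PORT A =====

-- termination helper for the port's recursion (cited by decreasing_by)
theorem pv_count_set_lt (u : List Bool) (i : Nat) (h : u[i]? = some false) :
    (u.set i true).count false < u.count false := by
  induction u generalizing i with
  | nil => simp at h
  | cons b t ih =>
    cases i with
    | zero =>
      have hb : b = false := by simpa using h
      subst hb
      simp [List.count_cons]
    | succ i =>
      have h' : t[i]? = some false := by simpa using h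
      have := ih i h'
      cases b <;> simp [List.count_cons] <;> omega

-- scan of A's `for idx in range(len(dungeons))` loop; branches where Python
-- would raise (missing used entry / short row) return the accumulator and are
-- excluded by Pre_.
def pvGoA (k : Int) (d : List (List Int)) (u : List Bool) (cnt : Int) (idx : Nat) (maxc : Int) : Int :=
  if h : idx < d.length then
    let newmax :=
      if hu : u[idx]? = some false then
        match (d[idx]'h)[0]? with
        | some req =>
          if k ≥ req then
            match (d[idx]'h)[1]? with
            | some c => max maxc (pvGoA (k - c) d (u.set idx true) (cnt+1) 0 (cnt+1))
            | none => maxc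
          else maxc
        | none => maxc
      else maxc
    pvGoA k d u cnt (idx+1) newmax
  else maxc
termination_by (u.count false, d.length - idx)
decreasing_by
  · exact Prod.Lex.left _ _ (pv_count_set_lt u idx hu)
  · exact Prod.Lex.right _ (by omega)

def choose_dungeons (k : Int) (dungeons : List (List Int)) (used : List Bool) (cnt : Int) : Int :=
  pvGoA k dungeons used cnt 0 cnt

-- ===== PORT B =====

-- popcount: port of bin(mask).count("1")
def pvPop (m : Nat) : Nat :=
  if m = 0 then 0 else m % 2 + pvPop (m / 2)
decreasing_by exact Nat.div_lt_self (by omega) (by omega)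

-- the list comprehension building `items` (getD defaults are unreachable under Pre_,
-- where every free row has ≥ 2 entries and used covers dungeons)
def pvItems (d : List (List Int)) (u : List Bool) : List (Int × Int) :=
  (List.range d.length).filterMap (fun i =>
    if u.getD i true = false then some ((d.getD i []).getD 0 0, (d.getD i []).getD 1 0) else none)

-- the inner `for i in range(n): ... break` loop
def pvFindStep (ds : List (Int × Int)) (spent : List (Option Int)) (m : Nat) : Option Int :=
  (List.range ds.length).findSome? (fun i =>
    if (m >>> i) &&& 1 = 1 then
      match spent.getD (m ^^^ (1 <<< i)) none with
      | some prev => if prev ≥ (ds.getD i (0, 0)).1 then some (prev - (ds.getD i (0, 0)).2) else none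
      | none => none
    else none)

-- one iteration of the `for mask in range(1, 1 << n)` loop body
def pvStep (items : List (Int × Int)) (st : List (Option Int) × Int) (m : Nat) :
    List (Option Int) × Int :=
  let spent' := match pvFindStep items st.1 m with
    | some v => st.1.set m (some v)
    | none => st.1
  let best' := if (spent'.getD m none).isSome then max st.2 (Int.ofNat (pvPop m)) else st.2
  (spent', best')

def choose_dungeons_alt (k : Int) (dungeons : List (List Int)) (used : List Bool) (cnt : Int) : Int :=
  let items := pvItems dungeons used
  let n := items.length
  let init : List (Option Int) := (List.replicate (2 ^ n) (none : Option Int)).set 0 (some k)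
  let res := (List.range' 1 (2 ^ n - 1)).foldl (pvStep items) (init, 0)
  cnt + res.2

-- ===== PRECONDITION & SPEC =====
-- Pre_ excludes exactly the shapes on which Python can raise an IndexError:
-- `used` shorter than `dungeons` (A always raises), and a free row with fewer
-- than 2 entries (A raises unless its requirement is never affordable, in
-- which case A returns while B raises building `items` — see the cite).
def Pre_choose_dungeons (k : Int) (dungeons : List (List Int)) (used : List Bool) (cnt : Int) : Prop :=
  dungeons.length ≤ used.length ∧
  ∀ i, i < dungeons.length → used.getD i true = false → 2 ≤ (dungeons.getD i []).length

instance (k : Int) (dungeons : List (List Int)) (used : List Bool) (cnt : Int) : Decidable (Pre_choose_dungeons k dungeons used cnt) := by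
  unfold Pre_choose_dungeons; infer_instance

def pvWitness_choose_dungeons : Int × List (List Int) × List Bool × Int :=
  (7, [[3, 2], [5, 1], [4, 3]], [false, false, true], 0)

def Spec_choose_dungeons (k : Int) (dungeons : List (List Int)) (used : List Bool) (cnt : Int) (out : Int) : Prop := out = choose_dungeons_alt k dungeons used cnt
instance (k : Int) (dungeons : List (List Int)) (used : List Bool) (cnt : Int) (out : Int) : Decidable (Spec_choose_dungeons k dungeons used cnt out) := by unfold Spec_choose_dungeons; infer_instance

-- ===== CLAIM (what is proved, stated in full; the proofs are below) =====
def Claim_equal_choose_dungeons : Prop := ∀ (k : Int) (dungeons : List (List Int)) (used : List Bool) (cnt : Int), Dom_choose_dungeons k dungeons used cnt → Pre_choose_dungeons k dungeons used cnt → Spec_choose_dungeons k dungeons used cnt (choose_dungeons k dungeons used cnt)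

-- ===== LEMMAS AND PROOFS =====

-- ---- shared specification: the best chain value ----

-- step-feasibility of an ordered chain of (requirement, cost) pairs
def pvOk (k : Int) : List (Int × Int) → Bool
  | [] => true
  | (r, c) :: t => decide (k ≥ r) && pvOk (k - c) t

def pvCost : List (Int × Int) → Int
  | [] => 0
  | (_, c) :: t => c + pvCost t

-- max length of a step-feasible subpermutation of ds
def pvSpl (k : Int) (ds : List (Int × Int)) : Nat :=
  ((ds.sublists.flatMap List.permutations).filter (fun l => pvOk k l)).foldr
    (fun l a => max l.length a) 0

-- the structural form of the free-rows list
def pvFI : List (List Int) → List Bool → List (Int × Int)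
  | _, [] => []
  | [], _ => []
  | row :: dt, b :: ut => if b then pvFI dt ut else (row.getD 0 0, row.getD 1 0) :: pvFI dt ut

-- pure form of A's search, scanning from idx
def pvS (k : Int) (d : List (List Int)) (u : List Bool) (idx : Nat) : Nat :=
  if h : idx < d.length then
    let rest := pvS k d u (idx + 1)
    if hc : u[idx]? = some false ∧ k ≥ (d.getD idx []).getD 0 0 then
      max (1 + pvS (k - (d.getD idx []).getD 1 0) d (u.set idx true) 0) rest
    else rest
  else 0
termination_by (u.count false, d.length - idx)
decreasing_by
  · exact Prod.Lex.right _ (by omega)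
  · exact Prod.Lex.left _ _ (pv_count_set_lt u idx hc.1)

-- bit-selected sublist, low bit first
def pvSel {α : Type} (m : Nat) : List α → List α
  | [] => []
  | a :: t => if m % 2 = 1 then a :: pvSel (m / 2) t else pvSel (m / 2) t

-- "mask m is clearable"
def pvReach (k : Int) (ds : List (Int × Int)) (m : Nat) : Prop :=
  ∃ l, l.Perm (pvSel m ds) ∧ pvOk k l = true

-- ---- basic lemmas ----

theorem pvOk_last (l : List (Int × Int)) (r c : Int) (k : Int) :
    pvOk k (l ++ [(r, c)]) = (pvOk k l && decide (k - pvCost l ≥ r)) := by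
  induction l generalizing k with
  | nil => simp [pvOk, pvCost]
  | cons a t ih =>
    obtain ⟨ra, ca⟩ := a
    simp [pvOk, pvCost, ih (k - ca), Bool.and_assoc, sub_sub]

theorem pvCost_eq_sum (l : List (Int × Int)) : pvCost l = (l.map Prod.snd).sum := by
  induction l with
  | nil => rfl
  | cons a t ih => obtain ⟨r, c⟩ := a; simp [pvCost, ih]

theorem pvCost_perm {l l' : List (Int × Int)} (h : l.Perm l') : pvCost l = pvCost l' := by
  rw [pvCost_eq_sum, pvCost_eq_sum]
  exact (h.map Prod.snd).sum_eq

-- ---- pvSpl characterization ----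

theorem pv_foldr_max_ge (L : List (List (Int × Int))) (l : List (Int × Int)) (h : l ∈ L) :
    l.length ≤ L.foldr (fun l a => max l.length a) 0 := by
  induction L with
  | nil => cases h
  | cons x t ih =>
    rcases List.mem_cons.1 h with h | h
    · subst h; simp [List.foldr]
    · simp [List.foldr]; right; exact ih h

theorem pv_foldr_max_attained (L : List (List (Int × Int))) :
    L.foldr (fun l a => max l.length a) 0 = 0 ∨
    ∃ l ∈ L, l.length = L.foldr (fun l a => max l.length a) 0 := by
  induction L with
  | nil => left; rfl
  | cons x t ih =>
    simp only [List.foldr]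
    rcases Nat.le_total x.length (t.foldr (fun l a => max l.length a) 0) with h | h
    · rcases ih with h0 | ⟨l, hl, he⟩
      · rw [h0] at h ⊢; interval_cases hx : x.length <;> simp_all
      · right; exact ⟨l, by simp [hl], by omega⟩
    · right; exact ⟨x, by simp, by omega⟩

theorem pvSpl_le {k : Int} {ds l : List (Int × Int)} (hs : l.Subperm ds) (hok : pvOk k l = true) :
    l.length ≤ pvSpl k ds := by
  obtain ⟨s, hperm, hsub⟩ := hs
  apply pv_foldr_max_ge
  simp only [List.mem_filter, List.mem_flatMap]
  exact ⟨⟨s, List.mem_sublists.2 hsub, List.mem_permutations.2 hperm.symm⟩, hok⟩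

theorem pvSpl_attained (k : Int) (ds : List (Int × Int)) :
    ∃ l, l.Subperm ds ∧ pvOk k l = true ∧ l.length = pvSpl k ds := by
  rcases pv_foldr_max_attained (((ds.sublists.flatMap List.permutations).filter (fun l => pvOk k l))) with h0 | ⟨l, hl, he⟩
  · exact ⟨[], List.nil_subperm, rfl, by simp [pvSpl, h0]⟩
  · refine ⟨l, ?_, ?_, he⟩
    · rcases List.mem_filter.1 hl with ⟨hm, _⟩
      rcases List.mem_flatMap.1 hm with ⟨s, hs, hp⟩
      exact (List.mem_permutations.1 hp).subperm.trans (List.mem_sublists.1 hs).subperm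
    · exact (List.mem_filter.1 hl).2

-- ---- A-side ----

def pvRowsOK (d : List (List Int)) (u : List Bool) : Prop :=
  ∀ i, i < d.length → u[i]? = some false → 2 ≤ (d.getD i []).length

theorem pvRowsOK_set (d : List (List Int)) (u : List Bool) (i : Nat) (h : pvRowsOK d u) :
    pvRowsOK d (u.set i true) := by
  intro j hj hf
  apply h j hj
  by_cases hij : i = j
  · subst hij
    exfalso
    by_cases hlt : i < u.length
    · rw [List.getElem?_set_self hlt] at hf
      simp at hf
    · have hn : (u.set i true)[i]? = none := List.getElem?_eq_none (by simp; omega)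
      rw [hn] at hf
      cases hf
  · rwa [List.getElem?_set_ne hij] at hf

theorem pvS_nonneg (k : Int) (d : List (List Int)) (u : List Bool) (idx : Nat) : 0 ≤ pvS k d u idx :=
  Nat.zero_le _

def pvMeas (d : List (List Int)) (u : List Bool) (idx : Nat) : Nat :=
  u.count false * (d.length + 1) + (d.length - idx)

theorem pvMeas_inner (d : List (List Int)) (u : List Bool) (idx : Nat)
    (hu : u[idx]? = some false) : pvMeas d (u.set idx true) 0 < pvMeas d u idx := by
  have h1 := pv_count_set_lt u idx hu
  have h2 := Nat.mul_le_mul_right (k := d.length + 1) (Nat.succ_le_of_lt h1)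
  unfold pvMeas
  rw [Nat.succ_mul] at h2
  omega

theorem pvMeas_outer (d : List (List Int)) (u : List Bool) (idx : Nat)
    (h : idx < d.length) : pvMeas d u (idx + 1) < pvMeas d u idx := by
  unfold pvMeas
  omega

theorem pvGoA_eq_aux (d : List (List Int)) : ∀ (n : Nat) (k : Int) (u : List Bool) (cnt : Int)
    (idx : Nat) (maxc : Int), pvMeas d u idx ≤ n → pvRowsOK d u → cnt ≤ maxc →
    pvGoA k d u cnt idx maxc = max maxc (cnt + pvS k d u idx) := by
  intro n
  induction n using Nat.strong_induction_on with
  | _ n ih =>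
  intro k u cnt idx maxc hn hrows hm
  by_cases h : idx < d.length
  · have hdg : d.getD idx [] = d[idx]'h := by
      rw [List.getD_eq_getElem?_getD, List.getElem?_eq_getElem h]
      rfl
    by_cases hu : u[idx]? = some false
    · have hrow : 2 ≤ (d[idx]'h).length := hdg ▸ hrows idx h hu
      have h0 : (d[idx]'h)[0]? = some ((d.getD idx []).getD 0 0) := by
        rw [List.getD_eq_getElem?_getD, hdg, List.getElem?_eq_getElem (by omega : 0 < (d[idx]'h).length)]
        rfl
      have h1 : (d[idx]'h)[1]? = some ((d.getD idx []).getD 1 0) := by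
        rw [List.getD_eq_getElem?_getD, hdg, List.getElem?_eq_getElem (by omega : 1 < (d[idx]'h).length)]
        rfl
      have hmi := pvMeas_inner d u idx hu
      have hmo := pvMeas_outer d u idx h
      by_cases hk : k ≥ (d.getD idx []).getD 0 0
      · rw [pvGoA, pvS]
        simp only [dif_pos h, dif_pos hu, h0, h1, if_pos hk, dif_pos (And.intro hu hk)]
        have hin := ih (pvMeas d (u.set idx true) 0) (by omega) (k - (d.getD idx []).getD 1 0)
          (u.set idx true) (cnt + 1) 0 (cnt + 1) le_rfl (pvRowsOK_set d u idx hrows) le_rfl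
        rw [hin]
        have hout := ih (pvMeas d u (idx + 1)) (by omega) k u cnt (idx + 1)
          (max maxc (max (cnt + 1) (cnt + 1 + ↑(pvS (k - (d.getD idx []).getD 1 0) d (u.set idx true) 0))))
          le_rfl hrows (by omega)
        rw [hout]
        have hS1 : (0 : Int) ≤ (pvS (k - (d.getD idx []).getD 1 0) d (u.set idx true) 0 : Int) := by positivity
        have hS2 : (0 : Int) ≤ (pvS k d u (idx + 1) : Int) := by positivity
        push_cast
        omega
      · have hcneg : ¬(u[idx]? = some false ∧ k ≥ (d.getD idx []).getD 0 0) := fun hc => hk hc.2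
        rw [pvGoA, pvS]
        simp only [dif_pos h, dif_pos hu, h0, if_neg hk, dif_neg hcneg]
        exact ih (pvMeas d u (idx + 1)) (by omega) k u cnt (idx + 1) maxc le_rfl hrows hm
    · have hmo := pvMeas_outer d u idx h
      have hcneg : ¬(u[idx]? = some false ∧ k ≥ (d.getD idx []).getD 0 0) := fun hc => hu hc.1
      rw [pvGoA, pvS]
      simp only [dif_pos h, dif_neg hu, dif_neg hcneg]
      exact ih (pvMeas d u (idx + 1)) (by omega) k u cnt (idx + 1) maxc le_rfl hrows hm
  · rw [pvGoA, dif_neg h, pvS, dif_neg h]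
    omega

theorem pvGoA_eq (k : Int) (d : List (List Int)) (u : List Bool) (cnt : Int) (idx : Nat) (maxc : Int)
    (hrows : pvRowsOK d u) (hm : cnt ≤ maxc) :
    pvGoA k d u cnt idx maxc = max maxc (cnt + pvS k d u idx) :=
  pvGoA_eq_aux d (pvMeas d u idx) k u cnt idx maxc le_rfl hrows hm

theorem choose_dungeons_eq_S (k : Int) (d : List (List Int)) (u : List Bool) (cnt : Int)
    (hrows : pvRowsOK d u) :
    choose_dungeons k d u cnt = cnt + pvS k d u 0 := by
  rw [choose_dungeons, pvGoA_eq k d u cnt 0 cnt hrows le_rfl]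
  have := pvS_nonneg k d u 0
  omega

theorem pvFI_perm (d : List (List Int)) (u : List Bool) (i : Nat)
    (hi : i < d.length) (hu : u[i]? = some false) :
    (pvFI d u).Perm (((d.getD i []).getD 0 0, (d.getD i []).getD 1 0) :: pvFI d (u.set i true)) := by
  induction d generalizing u i with
  | nil => simp at hi
  | cons row dt ih =>
    cases u with
    | nil => simp at hu
    | cons b ut =>
      cases i with
      | zero =>
        have hb : b = false := by simpa using hu
        subst hb
        simp [pvFI]
      | succ i =>
        have hu' : ut[i]? = some false := by simpa using hu
        have hi' : i < dt.length := by simpa using hi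
        have hih := ih ut i hi' hu'
        cases b with
        | true => simpa [pvFI] using hih
        | false =>
          simp only [pvFI, List.set_cons_succ, List.getD_cons_succ, if_neg, Bool.false_eq_true,
            not_false_eq_true, ite_false]
          exact (hih.cons _).trans (List.Perm.swap _ _ _)

theorem pvFI_mem {d : List (List Int)} {u : List Bool} {r c : Int} (h : (r, c) ∈ pvFI d u) :
    ∃ i, i < d.length ∧ u[i]? = some false ∧ (d.getD i []).getD 0 0 = r ∧ (d.getD i []).getD 1 0 = c := by
  induction d generalizing u with
  | nil =>
    cases u <;> simp [pvFI] at h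
  | cons row dt ih =>
    cases u with
    | nil => simp [pvFI] at h
    | cons b ut =>
      cases b with
      | true =>
        simp only [pvFI, ite_true] at h
        obtain ⟨i, hi, hu, hr, hc⟩ := ih h
        exact ⟨i + 1, by simpa using hi, by simpa using hu, by simpa using hr, by simpa using hc⟩
      | false =>
        simp only [pvFI, Bool.false_eq_true, if_neg, not_false_eq_true, ite_false] at h
        rcases List.mem_cons.1 h with h | h
        · refine ⟨0, by simp, by simp, ?_, ?_⟩ <;> simp_all
        · obtain ⟨i, hi, hu, hr, hc⟩ := ih h
          exact ⟨i + 1, by simpa using hi, by simpa using hu, by simpa using hr, by simpa using hc⟩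

theorem pvS_unfold (k : Int) (d : List (List Int)) (u : List Bool) (idx : Nat)
    (h : idx < d.length) :
    pvS k d u idx = if u[idx]? = some false ∧ k ≥ (d.getD idx []).getD 0 0 then
      max (1 + pvS (k - (d.getD idx []).getD 1 0) d (u.set idx true) 0) (pvS k d u (idx + 1))
    else pvS k d u (idx + 1) := by
  rw [pvS, dif_pos h]
  rfl

theorem pvSpl_ext (k : Int) (d : List (List Int)) (u : List Bool) (i : Nat)
    (hi : i < d.length) (hu : u[i]? = some false) (hk : k ≥ (d.getD i []).getD 0 0) :
    1 + pvSpl (k - (d.getD i []).getD 1 0) (pvFI d (u.set i true)) ≤ pvSpl k (pvFI d u) := by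
  obtain ⟨l, hsub, hok, hlen⟩ := pvSpl_attained (k - (d.getD i []).getD 1 0) (pvFI d (u.set i true))
  have hcand : (((d.getD i []).getD 0 0, (d.getD i []).getD 1 0) :: l).Subperm (pvFI d u) :=
    ((List.subperm_cons _).2 hsub).trans (pvFI_perm d u i hi hu).symm.subperm
  have hok2 : pvOk k (((d.getD i []).getD 0 0, (d.getD i []).getD 1 0) :: l) = true := by
    simp only [pvOk, Bool.and_eq_true, decide_eq_true_eq]
    exact ⟨hk, hok⟩
  have := pvSpl_le hcand hok2
  simp only [List.length_cons] at this
  omega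

theorem pvS_le_spl_aux (d : List (List Int)) : ∀ (n : Nat) (k : Int) (u : List Bool) (idx : Nat),
    pvMeas d u idx ≤ n → pvS k d u idx ≤ pvSpl k (pvFI d u) := by
  intro n
  induction n using Nat.strong_induction_on with
  | _ n ih =>
  intro k u idx hn
  by_cases h : idx < d.length
  · rw [pvS, dif_pos h]
    have hmo := pvMeas_outer d u idx h
    by_cases hc : u[idx]? = some false ∧ k ≥ (d.getD idx []).getD 0 0
    · rw [dif_pos hc]
      have hmi := pvMeas_inner d u idx hc.1
      apply max_le
      · have hin := ih (pvMeas d (u.set idx true) 0) (by omega)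
          (k - (d.getD idx []).getD 1 0) (u.set idx true) 0 le_rfl
        have hext := pvSpl_ext k d u idx h hc.1 hc.2
        omega
      · exact ih (pvMeas d u (idx + 1)) (by omega) k u (idx + 1) le_rfl
    · rw [dif_neg hc]
      exact ih (pvMeas d u (idx + 1)) (by omega) k u (idx + 1) le_rfl
  · rw [pvS, dif_neg h]
    exact Nat.zero_le _

theorem pvS_le_spl (k : Int) (d : List (List Int)) (u : List Bool) (idx : Nat) :
    pvS k d u idx ≤ pvSpl k (pvFI d u) :=
  pvS_le_spl_aux d (pvMeas d u idx) k u idx le_rfl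

theorem pvS_ge_branch (k : Int) (d : List (List Int)) (u : List Bool) (i : Nat)
    (hi : i < d.length) (hu : u[i]? = some false) (hk : k ≥ (d.getD i []).getD 0 0) :
    ∀ idx, idx ≤ i → 1 + pvS (k - (d.getD i []).getD 1 0) d (u.set i true) 0 ≤ pvS k d u idx := by
  have key : ∀ (j : Nat) (idx : Nat), i - idx ≤ j → idx ≤ i →
      1 + pvS (k - (d.getD i []).getD 1 0) d (u.set i true) 0 ≤ pvS k d u idx := by
    intro j
    induction j with
    | zero =>
      intro idx hj hle
      have : idx = i := by omega
      subst this
      rw [pvS_unfold k d u idx hi, if_pos (And.intro hu hk)]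
      exact le_max_left _ _
    | succ j ihj =>
      intro idx hj hle
      by_cases heq : idx = i
      · subst heq
        rw [pvS_unfold k d u idx hi, if_pos (And.intro hu hk)]
        exact le_max_left _ _
      · have hstep : pvS k d u (idx + 1) ≤ pvS k d u idx := by
          rw [pvS_unfold k d u idx (by omega : idx < d.length)]
          by_cases hc : u[idx]? = some false ∧ k ≥ (d.getD idx []).getD 0 0
          · rw [if_pos hc]; exact le_max_right _ _
          · rw [if_neg hc]
        exact le_trans (ihj (idx + 1) (by omega) (by omega)) hstep
  intro idx hle
  exact key (i - idx) idx le_rfl hle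

theorem pv_chain_le (l : List (Int × Int)) :
    ∀ (k : Int) (d : List (List Int)) (u : List Bool),
      l.Subperm (pvFI d u) → pvOk k l = true → l.length ≤ pvS k d u 0 := by
  induction l with
  | nil => intro k d u _ _; exact Nat.zero_le _
  | cons a t ih =>
    obtain ⟨r, c⟩ := a
    intro k d u hsub hok
    have hmem : (r, c) ∈ pvFI d u := hsub.subset List.mem_cons_self
    obtain ⟨i, hi, hu, hr, hc⟩ := pvFI_mem hmem
    have hperm := pvFI_perm d u i hi hu
    rw [hr, hc] at hperm
    have hsub2 : t.Subperm (pvFI d (u.set i true)) :=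
      (List.subperm_cons (r, c)).1 (hsub.trans hperm.subperm)
    simp only [pvOk, Bool.and_eq_true, decide_eq_true_eq] at hok
    have hih := ih (k - c) d (u.set i true) hsub2 hok.2
    have hbr := pvS_ge_branch k d u i hi hu (by rw [hr]; exact hok.1) 0 (Nat.zero_le i)
    rw [hc] at hbr
    simp only [List.length_cons]
    omega

theorem pvS_eq_spl (k : Int) (d : List (List Int)) (u : List Bool) :
    pvS k d u 0 = pvSpl k (pvFI d u) := by
  apply Nat.le_antisymm (pvS_le_spl k d u 0)
  obtain ⟨l, hsub, hok, hlen⟩ := pvSpl_attained k (pvFI d u)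
  rw [← hlen]
  exact pv_chain_le l k d u hsub hok

-- ---- B-side: bit lemmas ----

theorem pvSel_sublist {α : Type} (m : Nat) (ds : List α) : (pvSel m ds).Sublist ds := by
  induction ds generalizing m with
  | nil => simp [pvSel]
  | cons a t ih =>
    by_cases h : m % 2 = 1 <;> simp [pvSel, h]
    · exact ih (m / 2)
    · exact (ih (m / 2)).cons a

theorem pvSel_zero {α : Type} (ds : List α) : pvSel 0 ds = [] := by
  induction ds with
  | nil => rfl
  | cons a t ih => simp [pvSel, ih]

theorem pvSel_eq_nil {α : Type} {m : Nat} {ds : List α} (hm : m < 2 ^ ds.length)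
    (h : pvSel m ds = []) : m = 0 := by
  induction ds generalizing m with
  | nil => simpa using hm
  | cons a t ih =>
    by_cases h2 : m % 2 = 1
    · simp only [pvSel, h2, if_pos] at h
      cases h
    · simp only [pvSel, h2, if_neg, ite_false] at h
      have := ih (m := m / 2) (by simp [pow_succ] at hm; omega) h
      omega

theorem pv_sublist_exists_sel {α : Type} {s ds : List α} (h : s.Sublist ds) :
    ∃ m, m < 2 ^ ds.length ∧ pvSel m ds = s := by
  induction h with
  | slnil => exact ⟨0, by simp, rfl⟩
  | @cons l₁ l₂ a hs ih =>
    obtain ⟨m, hm, he⟩ := ih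
    refine ⟨2 * m, by simp [pow_succ]; omega, ?_⟩
    simp [pvSel, Nat.mul_div_cancel_left m (by omega : 0 < 2), (by omega : 2 * m % 2 ≠ 1), he]
  | @cons₂ l₁ l₂ a hs ih =>
    obtain ⟨m, hm, he⟩ := ih
    refine ⟨2 * m + 1, by simp [pow_succ]; omega, ?_⟩
    simp [pvSel, (by omega : (2 * m + 1) % 2 = 1), (by omega : (2 * m + 1) / 2 = m), he]

theorem pv_testBit_div_two (m i : Nat) : (m / 2).testBit i = m.testBit (i + 1) :=
  Nat.testBit_div_two m i

theorem pv_xor_pow_div (m i : Nat) : (m ^^^ 2 ^ (i + 1)) / 2 = (m / 2) ^^^ 2 ^ i := by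
  apply Nat.eq_of_testBit_eq
  intro j
  rw [pv_testBit_div_two, Nat.testBit_xor, Nat.testBit_xor, pv_testBit_div_two,
    Nat.testBit_two_pow, Nat.testBit_two_pow]
  simp [Nat.succ_inj]

theorem pv_xor_pow_mod (m i : Nat) : (m ^^^ 2 ^ (i + 1)) % 2 = m % 2 := by
  have h0 : (m ^^^ 2 ^ (i + 1)).testBit 0 = m.testBit 0 := by
    rw [Nat.testBit_xor, Nat.testBit_two_pow]; simp
  rw [Nat.testBit_zero, Nat.testBit_zero] at h0
  rcases Nat.mod_two_eq_zero_or_one m with h | h <;>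
    rcases Nat.mod_two_eq_zero_or_one (m ^^^ 2 ^ (i + 1)) with h2 | h2 <;> simp_all

theorem pv_xor_one_div (m : Nat) : (m ^^^ 1) / 2 = m / 2 := by
  apply Nat.eq_of_testBit_eq
  intro j
  rw [pv_testBit_div_two, pv_testBit_div_two, Nat.testBit_xor]
  have : (1 : Nat).testBit (j + 1) = false := by
    have : (1 : Nat) = 2 ^ 0 := rfl
    rw [this, Nat.testBit_two_pow]; simp
  simp [this]

theorem pv_xor_one_mod {m : Nat} (h : m % 2 = 1) : (m ^^^ 1) % 2 = 0 := by
  have h0 : (m ^^^ 1).testBit 0 = false := by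
    rw [Nat.testBit_xor]
    have h1 : (1 : Nat).testBit 0 = true := rfl
    have hm : m.testBit 0 = true := by rw [Nat.testBit_zero]; simp [h]
    rw [h1, hm]
    rfl
  rw [Nat.testBit_zero] at h0
  rcases Nat.mod_two_eq_zero_or_one (m ^^^ 1) with h2 | h2
  · exact h2
  · rw [h2] at h0; simp at h0

theorem pvSel_xor_perm {α : Type} (ds : List α) (m i : Nat) (hi : i < ds.length)
    (hb : m.testBit i = true) :
    (pvSel m ds).Perm ((ds[i]'hi) :: pvSel (m ^^^ (2 ^ i)) ds) := by
  induction ds generalizing m i with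
  | nil => simp at hi
  | cons a t ih =>
    cases i with
    | zero =>
      have hm : m % 2 = 1 := by rw [Nat.testBit_zero] at hb; simpa using hb
      have e2 : (2 : Nat) ^ 0 = 1 := rfl
      rw [e2]
      have e1 : pvSel (m ^^^ 1) (a :: t) = pvSel ((m ^^^ 1) / 2) t := by
        simp only [pvSel]
        rw [if_neg (by rw [pv_xor_one_mod hm]; omega)]
      rw [e1, pv_xor_one_div]
      simp only [pvSel]
      rw [if_pos hm]
      simp
    | succ i =>
      have hb' : (m / 2).testBit i = true := by rw [pv_testBit_div_two]; exact hb
      have hi' : i < t.length := by simpa using hi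
      have hih := ih (m / 2) i hi' hb'
      have e1 : pvSel (m ^^^ 2 ^ (i + 1)) (a :: t) =
          (if m % 2 = 1 then a :: pvSel ((m / 2) ^^^ 2 ^ i) t else pvSel ((m / 2) ^^^ 2 ^ i) t) := by
        simp only [pvSel]
        rw [pv_xor_pow_mod, pv_xor_pow_div]
      have e0 : (a :: t)[i + 1]'hi = t[i]'hi' := by simp
      rw [e1, e0]
      by_cases hm : m % 2 = 1
      · simp only [pvSel, hm, if_pos]
        exact (hih.cons a).trans (List.Perm.swap _ _ _)
      · simp only [pvSel]
        rw [if_neg hm, if_neg hm]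
        exact hih

theorem pvSel_mem_index {α : Type} {m : Nat} {ds : List α} {a : α} (h : a ∈ pvSel m ds) :
    ∃ i, ∃ hi : i < ds.length, m.testBit i = true ∧ ds[i]'hi = a := by
  induction ds generalizing m with
  | nil => simp [pvSel] at h
  | cons x t ih =>
    by_cases hm : m % 2 = 1
    · simp only [pvSel, hm, if_pos] at h
      rcases List.mem_cons.1 h with h | h
      · exact ⟨0, by simp, by rw [Nat.testBit_zero]; simpa using hm, by simp [h]⟩
      · obtain ⟨i, hi, hb, he⟩ := ih h
        exact ⟨i + 1, by simpa using hi, by rw [← pv_testBit_div_two]; exact hb, by simpa using he⟩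
    · simp only [pvSel, if_neg hm, ite_false] at h
      obtain ⟨i, hi, hb, he⟩ := ih h
      exact ⟨i + 1, by simpa using hi, by rw [← pv_testBit_div_two]; exact hb, by simpa using he⟩

theorem pvPop_eq_length {α : Type} (ds : List α) (m : Nat) (hm : m < 2 ^ ds.length) :
    pvPop m = (pvSel m ds).length := by
  induction ds generalizing m with
  | nil =>
    have : m = 0 := by simpa using hm
    subst this; simp [pvPop, pvSel]
  | cons a t ih =>
    by_cases h0 : m = 0
    · subst h0; simp [pvPop, pvSel_zero]
    · rw [pvPop, if_neg h0]
      have hlt : m / 2 < 2 ^ t.length := by simp [pow_succ] at hm; omega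
      by_cases hm2 : m % 2 = 1 <;> simp [pvSel, hm2, ← ih (m / 2) hlt] <;> omega

theorem pv_xor_lt {m i : Nat} (hb : m.testBit i = true) : m ^^^ 2 ^ i < m := by
  apply Nat.lt_of_testBit i
  · rw [Nat.testBit_xor, Nat.testBit_two_pow]; simp [hb]
  · exact hb
  · intro j hj
    rw [Nat.testBit_xor, Nat.testBit_two_pow]
    simp [Nat.ne_of_lt hj]

-- ---- B-side: reach characterization ----

theorem pvReach_zero (k : Int) (ds : List (Int × Int)) : pvReach k ds 0 :=
  ⟨[], by rw [pvSel_zero], rfl⟩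

theorem pvReach_iff (k : Int) (ds : List (Int × Int)) (m : Nat) (hm : m < 2 ^ ds.length) :
    pvReach k ds m ↔ (m = 0 ∨ ∃ i, ∃ hi : i < ds.length, m.testBit i = true ∧
      pvReach k ds (m ^^^ 2 ^ i) ∧ k - pvCost (pvSel (m ^^^ 2 ^ i) ds) ≥ (ds[i]'hi).1) := by
  constructor
  · rintro ⟨l, hp, hok⟩
    by_cases h0 : m = 0
    · exact Or.inl h0
    right
    rcases List.eq_nil_or_concat l with rfl | ⟨l', a, rfl⟩
    · exact absurd (pvSel_eq_nil hm hp.symm.eq_nil) h0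
    rw [List.concat_eq_append] at hp hok
    obtain ⟨ra, ca⟩ := a
    have hmem : (ra, ca) ∈ pvSel m ds := hp.subset (by simp)
    obtain ⟨i, hi, hb, he⟩ := pvSel_mem_index hmem
    have hxp := pvSel_xor_perm ds m i hi hb
    rw [he] at hxp
    have hl' : l'.Perm (pvSel (m ^^^ 2 ^ i) ds) := by
      have h1 : ((ra, ca) :: l').Perm ((ra, ca) :: pvSel (m ^^^ 2 ^ i) ds) :=
        ((List.perm_append_singleton _ _).symm.trans hp).trans hxp
      exact h1.cons_inv
    rw [pvOk_last] at hok
    simp only [Bool.and_eq_true, decide_eq_true_eq] at hok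
    refine ⟨i, hi, hb, ⟨l', hl', hok.1⟩, ?_⟩
    rw [he, ← pvCost_perm hl']
    exact hok.2
  · rintro (rfl | ⟨i, hi, hb, ⟨l', hp', hok'⟩, hge⟩)
    · exact pvReach_zero k ds
    refine ⟨l' ++ [ds[i]'hi], ?_, ?_⟩
    · exact (List.perm_append_singleton _ _).trans
        ((hp'.cons _).trans (pvSel_xor_perm ds m i hi hb).symm)
    · obtain ⟨hri, hci, hpair⟩ : ∃ r c, ds[i]'hi = (r, c) := ⟨_, _, rfl⟩
      rw [hpair, pvOk_last]
      simp only [Bool.and_eq_true, decide_eq_true_eq]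
      rw [← pvCost_perm hp'] at hge
      rw [hpair] at hge
      exact ⟨hok', hge⟩

-- ---- B-side: DP invariant ----

def pvInv (k : Int) (ds : List (Int × Int)) (M : Nat) (st : List (Option Int) × Int) : Prop :=
  st.1.length = 2 ^ ds.length ∧
  (∀ j, j < 2 ^ ds.length → j < M + 1 → pvReach k ds j →
    st.1.getD j none = some (k - pvCost (pvSel j ds))) ∧
  (∀ j, j < 2 ^ ds.length → (M + 1 ≤ j ∨ ¬ pvReach k ds j) → st.1.getD j none = none) ∧
  (∀ j, j < M + 1 → j < 2 ^ ds.length → pvReach k ds j → Int.ofNat (pvPop j) ≤ st.2) ∧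
  (∃ j, j < M + 1 ∧ j < 2 ^ ds.length ∧ pvReach k ds j ∧ st.2 = Int.ofNat (pvPop j))

theorem pv_bit_iff (m i : Nat) : ((m >>> i) &&& 1 = 1) ↔ m.testBit i = true := by
  constructor <;> intro h
  · simpa [Nat.testBit, Nat.and_one_is_mod] using h
  · simpa [Nat.testBit, Nat.and_one_is_mod] using h

theorem pv_findSome?_mem {α β : Type} {f : α → Option β} {l : List α} {b : β}
    (h : List.findSome? f l = some b) : ∃ a ∈ l, f a = some b := by
  obtain ⟨l₁, a, l₂, rfl, hfa, -⟩ := List.findSome?_eq_some_iff.1 h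
  exact ⟨a, by simp, hfa⟩

theorem pv_findSome?_isSome {α β : Type} {f : α → Option β} {l : List α} {a : α} {b : β}
    (ha : a ∈ l) (hfa : f a = some b) : (List.findSome? f l).isSome := by
  cases hfs : List.findSome? f l with
  | some v => rfl
  | none =>
    have := List.findSome?_eq_none_iff.1 hfs a ha
    rw [this] at hfa
    cases hfa

theorem pvCost_sel_xor (ds : List (Int × Int)) (m i : Nat) (hi : i < ds.length)
    (hb : m.testBit i = true) :
    pvCost (pvSel m ds) = (ds[i]'hi).2 + pvCost (pvSel (m ^^^ 2 ^ i) ds) := by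
  have := pvCost_perm (pvSel_xor_perm ds m i hi hb)
  rw [this]
  rfl

theorem pv_getD_eq (ds : List (Int × Int)) (i : Nat) (hi : i < ds.length) :
    ds.getD i (0, 0) = ds[i]'hi := by
  rw [List.getD_eq_getElem?_getD, List.getElem?_eq_getElem hi]
  rfl

theorem pvFindStep_some {k : Int} {ds : List (Int × Int)} {spent : List (Option Int)} {M : Nat}
    (hM : M + 1 < 2 ^ ds.length)
    (hsp : ∀ j, j < 2 ^ ds.length → j < M + 1 → pvReach k ds j →
      spent.getD j none = some (k - pvCost (pvSel j ds)))
    (hsn : ∀ j, j < 2 ^ ds.length → (M + 1 ≤ j ∨ ¬ pvReach k ds j) → spent.getD j none = none) :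
    (pvReach k ds (M + 1) → ∃ v, pvFindStep ds spent (M + 1) = some v) ∧
    (∀ v, pvFindStep ds spent (M + 1) = some v →
      pvReach k ds (M + 1) ∧ v = k - pvCost (pvSel (M + 1) ds)) := by
  constructor
  · intro hre
    rcases (pvReach_iff k ds (M + 1) hM).1 hre with h0 | ⟨i, hi, hb, hre', hge⟩
    · omega
    have hlt : (M + 1) ^^^ 2 ^ i < M + 1 := pv_xor_lt hb
    have hsome : spent.getD ((M + 1) ^^^ 2 ^ i) none =
        some (k - pvCost (pvSel ((M + 1) ^^^ 2 ^ i) ds)) :=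
      hsp _ (by omega) (by omega) hre'
    have hfa : (fun i => if (M + 1) >>> i &&& 1 = 1 then
        match spent.getD ((M + 1) ^^^ (1 <<< i)) none with
        | some prev => if prev ≥ (ds.getD i (0, 0)).1 then some (prev - (ds.getD i (0, 0)).2) else none
        | none => none
      else none) i = some (k - pvCost (pvSel ((M + 1) ^^^ 2 ^ i) ds) - (ds.getD i (0, 0)).2) := by
      show (if (M + 1) >>> i &&& 1 = 1 then
        match spent.getD ((M + 1) ^^^ (1 <<< i)) none with
        | some prev => if prev ≥ (ds.getD i (0, 0)).1 then some (prev - (ds.getD i (0, 0)).2) else none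
        | none => none
      else none) = some (k - pvCost (pvSel ((M + 1) ^^^ 2 ^ i) ds) - (ds.getD i (0, 0)).2)
      rw [if_pos ((pv_bit_iff (M + 1) i).2 hb), Nat.one_shiftLeft, hsome]
      show (if k - pvCost (pvSel ((M + 1) ^^^ 2 ^ i) ds) ≥ (ds.getD i (0, 0)).1 then
          some (k - pvCost (pvSel ((M + 1) ^^^ 2 ^ i) ds) - (ds.getD i (0, 0)).2) else none) = _
      rw [if_pos (by rw [pv_getD_eq ds i hi]; exact hge)]
    have hs := pv_findSome?_isSome (f := fun i => if (M + 1) >>> i &&& 1 = 1 then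
        match spent.getD ((M + 1) ^^^ (1 <<< i)) none with
        | some prev => if prev ≥ (ds.getD i (0, 0)).1 then some (prev - (ds.getD i (0, 0)).2) else none
        | none => none
      else none) (List.mem_range.2 hi) hfa
    rw [Option.isSome_iff_exists] at hs
    obtain ⟨v, hv⟩ := hs
    exact ⟨v, hv⟩
  · intro v hv
    unfold pvFindStep at hv
    obtain ⟨i, hmem, hfa0⟩ := pv_findSome?_mem hv
    have hi : i < ds.length := List.mem_range.1 hmem
    have hfa : (if (M + 1) >>> i &&& 1 = 1 then
        match spent.getD ((M + 1) ^^^ (1 <<< i)) none with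
        | some prev => if prev ≥ (ds.getD i (0, 0)).1 then some (prev - (ds.getD i (0, 0)).2) else none
        | none => none
      else none) = some v := hfa0
    clear hfa0
    by_cases hbit : (M + 1) >>> i &&& 1 = 1
    · rw [if_pos hbit, Nat.one_shiftLeft] at hfa
      have hb : (M + 1).testBit i = true := (pv_bit_iff (M + 1) i).1 hbit
      have hlt : (M + 1) ^^^ 2 ^ i < M + 1 := pv_xor_lt hb
      cases hget : spent.getD ((M + 1) ^^^ 2 ^ i) none with
      | none => rw [hget] at hfa; cases hfa
      | some prev =>
        rw [hget] at hfa
        have hfa2 : (if prev ≥ (ds.getD i (0, 0)).1 then some (prev - (ds.getD i (0, 0)).2)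
            else none) = some v := hfa
        clear hfa
        have hre' : pvReach k ds ((M + 1) ^^^ 2 ^ i) := by
          by_contra hnr
          rw [hsn _ (by omega) (Or.inr hnr)] at hget
          cases hget
        have hprev : prev = k - pvCost (pvSel ((M + 1) ^^^ 2 ^ i) ds) := by
          have := hsp _ (by omega) (by omega) hre'
          rw [this] at hget
          exact (Option.some.inj hget).symm
        by_cases hgec : prev ≥ (ds.getD i (0, 0)).1
        · rw [if_pos hgec] at hfa2
          have hvv := (Option.some.inj hfa2).symm
          have hre : pvReach k ds (M + 1) := by
            rw [pvReach_iff k ds (M + 1) hM]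
            refine Or.inr ⟨i, hi, hb, hre', ?_⟩
            rw [← pv_getD_eq ds i hi, ← hprev]
            exact hgec
          refine ⟨hre, ?_⟩
          rw [hvv, hprev, pvCost_sel_xor ds (M + 1) i hi hb, pv_getD_eq ds i hi]
          ring
        · rw [if_neg hgec] at hfa2; cases hfa2
    · rw [if_neg hbit] at hfa; cases hfa

theorem pvInv_step (k : Int) (ds : List (Int × Int)) (M : Nat) (st : List (Option Int) × Int)
    (hM : M + 1 < 2 ^ ds.length) (hinv : pvInv k ds M st) :
    pvInv k ds (M + 1) (pvStep ds st (M + 1)) := by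
  obtain ⟨hlen, hsp, hsn, hub, ⟨j0, hj0M, hj0n, hj0r, hj0b⟩⟩ := hinv
  obtain ⟨hex, hval⟩ := pvFindStep_some hM hsp hsn
  unfold pvStep
  cases hfs : pvFindStep ds st.1 (M + 1) with
  | none =>
    have hnr : ¬ pvReach k ds (M + 1) := by
      intro hre
      obtain ⟨v, hv⟩ := hex hre
      rw [hfs] at hv
      cases hv
    have hm_none : st.1.getD (M + 1) none = none := hsn _ (by omega) (Or.inl le_rfl)
    simp only [hm_none, Option.isSome_none, Bool.false_eq_true, if_neg, ite_false]
    refine ⟨hlen, ?_, ?_, ?_, ⟨j0, by omega, hj0n, hj0r, hj0b⟩⟩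
    · intro j hj hjM hre
      rcases Nat.lt_or_ge j (M + 1) with hlt | hge
      · exact hsp j hj hlt hre
      · have hj1 : j = M + 1 := by omega
        exact absurd (hj1 ▸ hre) hnr
    · intro j hj hcase
      apply hsn j hj
      rcases hcase with hge | hnre
      · by_cases hj1 : j = M + 1
        · exact Or.inr (hj1 ▸ hnr)
        · exact Or.inl (by omega)
      · exact Or.inr hnre
    · intro j hj hjn hre
      rcases Nat.lt_or_ge j (M + 1) with hlt | hge
      · exact hub j hlt hjn hre
      · have hj1 : j = M + 1 := by omega
        exact absurd (hj1 ▸ hre) hnr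
  | some v =>
    obtain ⟨hre, hv⟩ := hval v hfs
    have hmlt : M + 1 < st.1.length := by omega
    have hgset : (st.1.set (M + 1) (some v)).getD (M + 1) none = some v := by
      rw [List.getD_eq_getElem?_getD, List.getElem?_set_self hmlt]
      rfl
    simp only [hgset, Option.isSome_some, if_pos]
    refine ⟨by simp [hlen], ?_, ?_, ?_, ?_⟩
    · intro j hj hjM hjre
      by_cases hj1 : j = M + 1
      · rw [hj1, hgset, hv]
      · rw [List.getD_eq_getElem?_getD, List.getElem?_set_ne (fun hh => hj1 hh.symm),
          ← List.getD_eq_getElem?_getD]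
        exact hsp j hj (by omega) hjre
    · intro j hj hcase
      have hj1 : j ≠ M + 1 := by
        intro hh
        rcases hcase with hge | hnre
        · omega
        · exact hnre (hh ▸ hre)
      rw [List.getD_eq_getElem?_getD, List.getElem?_set_ne (fun hh => hj1 hh.symm),
        ← List.getD_eq_getElem?_getD]
      apply hsn j hj
      rcases hcase with hge | hnre
      · exact Or.inl (by omega)
      · exact Or.inr hnre
    · intro j hjM hjn hjre
      rcases Nat.lt_or_ge j (M + 1) with hlt | hge
      · exact le_trans (hub j hlt hjn hjre) (le_max_left _ _)
      · have : j = M + 1 := by omega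
        rw [this]
        exact le_max_right _ _
    · rcases le_total st.2 (Int.ofNat (pvPop (M + 1))) with hle | hle
      · refine ⟨M + 1, by omega, by omega, hre, ?_⟩
        show max st.2 (Int.ofNat (pvPop (M + 1))) = Int.ofNat (pvPop (M + 1))
        exact max_eq_right hle
      · refine ⟨j0, by omega, hj0n, hj0r, ?_⟩
        show max st.2 (Int.ofNat (pvPop (M + 1))) = Int.ofNat (pvPop j0)
        rw [max_eq_left hle, hj0b]

theorem pvItems_eq (d : List (List Int)) (u : List Bool) : pvItems d u = pvFI d u := by
  induction d generalizing u with
  | nil => cases u <;> rfl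
  | cons row dt ih =>
    cases u with
    | nil =>
      show (List.range (row :: dt).length).filterMap _ = _
      rw [List.filterMap_eq_nil_iff.2 (by intro i _; simp [List.getD])]
      rfl
    | cons b ut =>
      show (List.range (dt.length + 1)).filterMap _ = _
      rw [List.range_succ_eq_map, List.filterMap_cons, List.filterMap_map]
      have he : ((fun i =>
          if (b :: ut).getD i true = false then
            some (((row :: dt).getD i []).getD 0 0, ((row :: dt).getD i []).getD 1 0)
          else none) ∘ Nat.succ) = (fun i =>
          if ut.getD i true = false then
            some ((dt.getD i []).getD 0 0, (dt.getD i []).getD 1 0)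
          else none) := by
        funext i
        simp [List.getD_cons_succ]
      rw [he]
      have htail : List.filterMap (fun i =>
          if ut.getD i true = false then
            some ((dt.getD i []).getD 0 0, (dt.getD i []).getD 1 0)
          else none) (List.range dt.length) = pvFI dt ut := ih ut
      cases b with
      | true => simpa [pvFI, List.getD] using htail
      | false => simpa [pvFI, List.getD] using htail

theorem pvAlt_eq_spl (k : Int) (d : List (List Int)) (u : List Bool) (cnt : Int) :
    choose_dungeons_alt k d u cnt = cnt + pvSpl k (pvFI d u) := by
  have halt : choose_dungeons_alt k d u cnt = cnt +
      ((List.range' 1 (2 ^ (pvFI d u).length - 1)).foldl (pvStep (pvFI d u))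
        ((List.replicate (2 ^ (pvFI d u).length) (none : Option Int)).set 0 (some k), 0)).2 := by
    show cnt + ((List.range' 1 (2 ^ (pvItems d u).length - 1)).foldl (pvStep (pvItems d u))
        ((List.replicate (2 ^ (pvItems d u).length) (none : Option Int)).set 0 (some k), 0)).2 = _
    rw [pvItems_eq]
  rw [halt]
  set ds := pvFI d u with hds
  set init : List (Option Int) := (List.replicate (2 ^ ds.length) (none : Option Int)).set 0 (some k)
    with hinit
  have h2 : 1 ≤ 2 ^ ds.length := Nat.one_le_two_pow
  have hpop0 : pvPop 0 = 0 := by rw [pvPop]; simp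
  have hinv0 : pvInv k ds 0 (init, 0) := by
    refine ⟨by simp [hinit], ?_, ?_, ?_, ⟨0, by omega, by omega, pvReach_zero k ds, ?_⟩⟩
    · intro j hj hj1 hre
      have hj0 : j = 0 := by omega
      subst hj0
      show init.getD 0 none = some (k - pvCost (pvSel 0 ds))
      rw [hinit, List.getD_eq_getElem?_getD, List.getElem?_set_self (by simp)]
      rw [pvSel_zero]
      show some k = some (k - 0)
      rw [sub_zero]
    · intro j hj hcase
      have hj0 : j ≠ 0 := by
        rcases hcase with h1 | h2'
        · omega
        · intro hh
          exact h2' (hh ▸ pvReach_zero k ds)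
      show init.getD j none = none
      rw [hinit, List.getD_eq_getElem?_getD, List.getElem?_set_ne (fun hh => hj0 hh.symm),
        List.getElem?_replicate, if_pos hj]
      rfl
    · intro j hj hjn hre
      have hj0 : j = 0 := by omega
      subst hj0
      show Int.ofNat (pvPop 0) ≤ 0
      rw [hpop0]
      rfl
    · show (0 : Int) = Int.ofNat (pvPop 0)
      rw [hpop0]
      rfl
  have hfold : ∀ M, M ≤ 2 ^ ds.length - 1 →
      pvInv k ds M ((List.range' 1 M).foldl (pvStep ds) (init, 0)) := by
    intro M
    induction M with
    | zero =>
      intro _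
      simpa using hinv0
    | succ M ihM =>
      intro hle
      have hr : List.range' 1 (M + 1) = List.range' 1 M ++ [M + 1] := by
        rw [List.range'_concat]
        simp [Nat.add_comm]
      rw [hr, List.foldl_append]
      simp only [List.foldl_cons, List.foldl_nil]
      exact pvInv_step k ds M _ (by omega) (ihM (by omega))
  obtain ⟨hlen, hsp, hsn, hub, ⟨j0, hj0M, hj0n, hj0r, hj0b⟩⟩ := hfold (2 ^ ds.length - 1) le_rfl
  set st := (List.range' 1 (2 ^ ds.length - 1)).foldl (pvStep ds) (init, 0) with hst
  have hle1 : st.2 ≤ (pvSpl k ds : Int) := by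
    rw [hj0b]
    obtain ⟨l, hp, hok⟩ := hj0r
    have hsubl : l.Subperm ds := hp.subperm.trans (pvSel_sublist j0 ds).subperm
    have hsplle := pvSpl_le hsubl hok
    have hpop : pvPop j0 = l.length := by rw [pvPop_eq_length ds j0 hj0n, hp.length_eq]
    rw [hpop]
    show (l.length : Int) ≤ (pvSpl k ds : Int)
    exact_mod_cast hsplle
  have hge1 : (pvSpl k ds : Int) ≤ st.2 := by
    obtain ⟨l, hsub, hok, hlenl⟩ := pvSpl_attained k ds
    obtain ⟨sl, hps, hss⟩ := hsub
    obtain ⟨m0, hm0n, hm0e⟩ := pv_sublist_exists_sel hss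
    have hre : pvReach k ds m0 := ⟨l, by rw [hm0e]; exact hps.symm, hok⟩
    have hubm := hub m0 (by omega) hm0n hre
    have hpop : pvPop m0 = l.length := by
      rw [pvPop_eq_length ds m0 hm0n, hm0e, hps.length_eq]
    have hfin : Int.ofNat (pvSpl k ds) ≤ st.2 := by
      rw [← hlenl, ← hpop]
      exact hubm
    exact_mod_cast hfin
  have : st.2 = (pvSpl k ds : Int) := le_antisymm hle1 hge1
  rw [this]

-- ===== VERDICT (by name: the statement is the Claim_ definition above) =====
theorem choose_dungeons_spec : Claim_equal_choose_dungeons := by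
  intro k d u cnt _ hpre
  unfold Spec_choose_dungeons
  have hrows : pvRowsOK d u := by
    intro i hi hf
    apply hpre.2 i hi
    rw [List.getD_eq_getElem?_getD, hf]; rfl
  rw [choose_dungeons_eq_S k d u cnt hrows, pvAlt_eq_spl, pvS_eq_spl]
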